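-- pv_equiv track=rewrite | github.com/alenny/leetcode-python3 | src/last-substring-in-lexicographical-order.py | lastSubstring1
-- ===== SOURCE A (Python) =====
-- def lastSubstring1(s: str) -> str:
--     N = len(s)
--     maxSub = ''
--     for i in range(N):
--         ss = s[i:]
--         if (ss > maxSub):
--             maxSub = ss
--     return maxSub
-- ===== SOURCE B (Python) =====
-- def lastSubstring1(s: str) -> str:
--     # Duval-style maximal-suffix scan: two candidate start positions i, j
--     # with a current match length k; O(n) time, no suffix slicing per step.
--     n = len(s)
--     i, j, k = 0, 1, 0
--     while j + k < n:
--         a, b = s[i + k], s[j + k]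
--         if a == b:
--             k += 1
--         elif a > b:
--             j = j + k + 1
--             k = 0
--         else:
--             i = max(i + k + 1, j)
--             j = i + 1
--             k = 0
--     return s[i:]
-- ===== Notes on version B (the rewrite author's own statement) =====
-- stated objective: faster
-- what changed: Replaced the O(n^2) scan that slices and compares every suffix with a Duval-style two-pointer maximal-suffix scan that finds the best start index in one O(n) pass and slices once.
import Mathlib
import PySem

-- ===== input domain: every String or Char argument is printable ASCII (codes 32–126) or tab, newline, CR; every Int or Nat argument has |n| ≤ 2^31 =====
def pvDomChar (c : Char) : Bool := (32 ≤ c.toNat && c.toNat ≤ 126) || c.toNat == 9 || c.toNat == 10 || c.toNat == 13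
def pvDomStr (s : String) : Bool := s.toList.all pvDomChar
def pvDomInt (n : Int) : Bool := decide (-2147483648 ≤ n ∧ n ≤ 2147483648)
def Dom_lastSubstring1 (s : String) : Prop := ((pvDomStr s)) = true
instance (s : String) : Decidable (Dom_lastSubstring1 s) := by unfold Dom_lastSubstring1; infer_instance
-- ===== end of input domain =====

-- B replaces A's O(n^2) all-suffix slice-and-compare scan by a Duval-style
-- two-pointer maximal-suffix scan (one O(n) pass finding the best start index).

-- ===== PORT A =====
-- Python string comparison 'ss > maxSub' is code-point lexicographic; per PYSEM it is
-- exactly Lean's '<' on s.toList, so the port works on List Char throughout.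
def lastSubstring1 (s : String) : String :=
  let l := s.toList
  let N : Int := PySem.Str.len s
  let maxSub := (PySem.List.pyRange 0 N 1).foldl
    (fun maxSub i =>
      let ss := PySem.List.slice l (some i) none    -- s[i:]
      if maxSub < ss then ss else maxSub) ([] : List Char)
  String.ofList maxSub

-- ===== PORT B =====
-- the while loop of Source B, with fuel making it structurally total (3*n+3 steps always
-- suffice, proved below); s[i+k]/s[j+k] are in range whenever the loop runs, the
-- getD default is never read.
def duvalLoop (l : List Char) (n : Nat) : Nat → Nat → Nat → Nat → Nat
  | 0, i, _, _ => i
  | fuel+1, i, j, k =>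
    if j + k < n then
      let a := l.getD (i + k) default
      let b := l.getD (j + k) default
      if a = b then duvalLoop l n fuel i j (k + 1)
      else if b < a then duvalLoop l n fuel i (j + k + 1) 0
      else duvalLoop l n fuel (max (i + k + 1) j) (max (i + k + 1) j + 1) 0
    else i

def lastSubstring1_alt (s : String) : String :=
  let l := s.toList
  let n := l.length
  let i := duvalLoop l n (3 * n + 3) 0 1 0
  String.ofList (l.drop i)    -- s[i:]

-- ===== PRECONDITION & SPEC =====
def Spec_lastSubstring1 (s : String) (out : String) : Prop := out = lastSubstring1_alt s
instance (s : String) (out : String) : Decidable (Spec_lastSubstring1 s out) := by unfold Spec_lastSubstring1; infer_instance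

-- ===== CLAIM (what is proved, stated in full; the proofs are below) =====
def Claim_equal_lastSubstring1 : Prop := ∀ (s : String), Dom_lastSubstring1 s → Spec_lastSubstring1 s (lastSubstring1 s)

-- ===== LEMMAS AND PROOFS =====

-- list-level version of A's fold
def pvFoldA (l : List Char) : List Char :=
  (List.range l.length).foldl (fun m k => if m < l.drop k then l.drop k else m) []

-- character of l at q (out of range: never used under the stated bounds)
def pvG (l : List Char) (q : Nat) : Char := l.getD q default

lemma lastSubstring1_eq_foldA (s : String) :
    lastSubstring1 s = String.ofList (pvFoldA s.toList) := by
  unfold lastSubstring1 pvFoldA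
  dsimp only
  rw [PySem.List.pyRange_one, List.foldl_map]
  congr 1
  have hN : (PySem.Str.len s - 0).toNat = s.toList.length := by
    simp [PySem.Str.len_eq]
  rw [hN]
  apply List.foldl_ext
  intro m k hk
  simp [PySem.List.slice_from_natCast]

-- A-side fold invariant: the accumulator is maximal among the suffixes seen, and is one of them
lemma foldA_inv (l : List Char) (t : Nat) (ht : t ≤ l.length) :
    (∀ q < t, ¬ ((List.range t).foldl (fun m k => if m < l.drop k then l.drop k else m) [] < l.drop q)) ∧
    ((List.range t).foldl (fun m k => if m < l.drop k then l.drop k else m) [] = [] ∨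
      ∃ q < t, (List.range t).foldl (fun m k => if m < l.drop k then l.drop k else m) [] = l.drop q) := by
  induction t with
  | zero => simp
  | succ t ih =>
    obtain ⟨h1, h2⟩ := ih (by omega)
    rw [List.range_succ, List.foldl_append]
    simp only [List.foldl_cons, List.foldl_nil]
    by_cases hlt : (List.range t).foldl (fun m k => if m < l.drop k then l.drop k else m) [] < l.drop t
    · rw [if_pos hlt]
      refine ⟨?_, Or.inr ⟨t, Nat.lt_succ_self t, rfl⟩⟩
      intro q hq
      rcases Nat.lt_succ_iff_lt_or_eq.mp hq with hq | rfl
      · intro hcon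
        exact h1 q hq (lt_trans hlt hcon)
      · exact lt_irrefl _
    · rw [if_neg hlt]
      constructor
      · intro q hq
        rcases Nat.lt_succ_iff_lt_or_eq.mp hq with hq | rfl
        · exact h1 q hq
        · exact hlt
      · rcases h2 with h2 | ⟨q, hq, h2⟩
        · exact Or.inl h2
        · exact Or.inr ⟨q, by omega, h2⟩

lemma foldA_max (l : List Char) (q : Nat) (hq : q < l.length) : ¬ (pvFoldA l < l.drop q) := by
  exact (foldA_inv l l.length le_rfl).1 q hq

lemma foldA_mem (l : List Char) (hn : 1 ≤ l.length) : ∃ q < l.length, pvFoldA l = l.drop q := by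
  rcases (foldA_inv l l.length le_rfl).2 with h | h
  · exfalso
    apply (foldA_inv l l.length le_rfl).1 0 hn
    rw [h, List.drop_zero]
    cases l with
    | nil => simp at hn
    | cons a t => exact List.nil_lt_cons a t
  · exact h

-- lexicographic order: a proper prefix is smaller
lemma lt_append (u t : List Char) (ht : t ≠ []) : u < u ++ t := by
  induction u with
  | nil =>
    cases t with
    | nil => exact absurd rfl ht
    | cons a t' => exact List.nil_lt_cons a t'
  | cons a u ih =>
    exact (List.lt_iff_lex_lt _ _).mpr (List.Lex.cons ((List.lt_iff_lex_lt _ _).mp ih))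

-- lexicographic order: equal first m characters, then a smaller character
lemma lt_of_agree (m : Nat) (x y : List Char) (hx : m < x.length) (hy : m < y.length)
    (hagree : x.take m = y.take m) (hlt : x.getD m default < y.getD m default) : x < y := by
  induction m generalizing x y with
  | zero =>
    cases x with
    | nil => simp at hx
    | cons a x' =>
      cases y with
      | nil => simp at hy
      | cons b y' =>
        exact (List.lt_iff_lex_lt _ _).mpr (List.Lex.rel (by simpa using hlt))
  | succ m ih =>
    cases x with
    | nil => simp at hx
    | cons a x' =>
      cases y with
      | nil => simp at hy
      | cons b y' =>
        simp only [List.take_succ_cons, List.cons.injEq] at hagree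
        obtain ⟨rfl, hagree⟩ := hagree
        have h1 : x' < y' := by
          refine ih x' y' (by simpa using hx) (by simpa using hy) hagree ?_
          simpa using hlt
        exact (List.lt_iff_lex_lt _ _).mpr (List.Lex.cons ((List.lt_iff_lex_lt _ _).mp h1))

-- suffix comparison: l[a..a+m) = l[b..b+m) and l[a+m] < l[b+m] gives drop a < drop b
lemma drop_lt_drop_of_diff (l : List Char) (a b m : Nat)
    (ha : a + m < l.length) (hb : b + m < l.length)
    (hagree : ∀ r < m, pvG l (a + r) = pvG l (b + r))
    (hlt : pvG l (a + m) < pvG l (b + m)) : l.drop a < l.drop b := by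
  have hla : m < (l.drop a).length := by simp [List.length_drop]; omega
  have hlb : m < (l.drop b).length := by simp [List.length_drop]; omega
  refine lt_of_agree m _ _ hla hlb ?_ ?_
  · apply List.ext_getElem
    · simp [List.length_take, List.length_drop]; omega
    · intro r hr1 hr2
      have hr : r < m := by simp [List.length_take, List.length_drop] at hr1; omega
      have e1 : (((l.drop a).take m))[r] = l[a + r]'(by omega) := by
        rw [List.getElem_take, List.getElem_drop]
      have e2 : (((l.drop b).take m))[r] = l[b + r]'(by omega) := by
        rw [List.getElem_take, List.getElem_drop]
      rw [e1, e2]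
      have := hagree r hr
      rwa [pvG, pvG, List.getD_eq_getElem l default (by omega : a + r < l.length),
        List.getD_eq_getElem l default (by omega : b + r < l.length)] at this
  · rw [List.getD_eq_getElem _ default hla, List.getD_eq_getElem _ default hlb,
      List.getElem_drop, List.getElem_drop]
    rwa [pvG, pvG, List.getD_eq_getElem l default ha, List.getD_eq_getElem l default hb] at hlt

-- suffix comparison: drop a agrees with drop b on all of drop a's characters and is shorter
lemma drop_lt_drop_of_prefix (l : List Char) (a b : Nat) (hb : b < a) (ha : a ≤ l.length)
    (hagree : ∀ r, a + r < l.length → pvG l (a + r) = pvG l (b + r)) :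
    l.drop a < l.drop b := by
  have hdecomp : l.drop b = l.drop a ++ List.drop (l.length - a) (l.drop b) := by
    nth_rewrite 1 [← List.take_append_drop (l.length - a) (l.drop b)]
    congr 1
    apply List.ext_getElem
    · simp [List.length_take, List.length_drop]; omega
    · intro r hr1 hr2
      have hr : a + r < l.length := by simp [List.length_drop] at hr2; omega
      have e1 : ((l.drop a))[r]'hr2 = l[a + r]'(by omega) := List.getElem_drop
      have e2 : (((l.drop b).take (l.length - a)))[r]'hr1 = l[b + r]'(by omega) := by
        rw [List.getElem_take, List.getElem_drop]
      rw [e1, e2]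
      have := (hagree r hr).symm
      rwa [pvG, pvG, List.getD_eq_getElem l default (by omega : a + r < l.length),
        List.getD_eq_getElem l default (by omega : b + r < l.length)] at this
  rw [hdecomp]
  apply lt_append
  intro hnil
  have := congrArg List.length hnil
  simp [List.length_drop] at this
  omega

-- exit state of the loop: i is the start of the maximal suffix
lemma duval_exit (l : List Char) (i j k : Nat) (hij : i < j) (hend : l.length ≤ j + k)
    (hmatch : ∀ t < k, pvG l (i + t) = pvG l (j + t))
    (hdom : ∀ q < j, q ≠ i → l.drop q < pvFoldA l) :
    l.drop i = pvFoldA l := by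
  rcases Nat.eq_zero_or_pos l.length with hn | hn
  · rw [List.length_eq_zero_iff.mp hn]
    simp [pvFoldA]
  obtain ⟨q0, hq0, hF⟩ := foldA_mem l hn
  by_cases hq0i : q0 = i
  · rw [hF, hq0i]
  by_cases hq0j : q0 < j
  · exfalso
    have := hdom q0 hq0j hq0i
    rw [hF] at this
    exact lt_irrefl _ this
  · exfalso
    obtain ⟨t, ht, rfl⟩ : ∃ t, t < k ∧ q0 = j + t := ⟨q0 - j, by omega, by omega⟩
    have hstep : l.drop (j + t) < l.drop (i + t) := by
      apply drop_lt_drop_of_prefix l (j + t) (i + t) (by omega) (by omega)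
      intro r hr
      have := hmatch (t + r) (by omega)
      have e1 : i + (t + r) = i + t + r := by omega
      have e2 : j + (t + r) = j + t + r := by omega
      rw [e1, e2] at this
      exact this.symm
    rw [← hF] at hstep
    exact foldA_max l (i + t) (by omega) hstep

-- main loop invariant
lemma duval_correct (l : List Char) (fuel i j k : Nat) (hij : i < j) (hjk : j + k ≤ l.length)
    (hmatch : ∀ t < k, pvG l (i + t) = pvG l (j + t))
    (hdom : ∀ q < j, q ≠ i → l.drop q < pvFoldA l)
    (hfuel : 3 * l.length < i + 2 * j + k + fuel) :
    l.drop (duvalLoop l l.length fuel i j k) = pvFoldA l := by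
  induction fuel generalizing i j k with
  | zero =>
    by_cases h : j + k < l.length
    · omega
    · exact duval_exit l i j k hij (by omega) hmatch hdom
  | succ fuel ih =>
    rw [duvalLoop]
    by_cases h : j + k < l.length
    · rw [if_pos h]
      by_cases hab : l.getD (i + k) default = l.getD (j + k) default
      · rw [if_pos hab]
        apply ih i j (k + 1) hij (by omega)
        · intro t ht
          rcases Nat.lt_succ_iff_lt_or_eq.mp ht with ht | rfl
          · exact hmatch t ht
          · exact hab
        · exact hdom
        · omega
      · rw [if_neg hab]
        by_cases hba : l.getD (j + k) default < l.getD (i + k) default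
        · rw [if_pos hba]
          apply ih i (j + k + 1) 0 (by omega) (by omega) (fun t ht => absurd ht (by omega))
          · intro q hq hqi
            by_cases hqj : q < j
            · exact hdom q hqj hqi
            · obtain ⟨t, ht, rfl⟩ : ∃ t, t ≤ k ∧ q = j + t := ⟨q - j, by omega, by omega⟩
              have hstep : l.drop (j + t) < l.drop (i + t) := by
                apply drop_lt_drop_of_diff l (j + t) (i + t) (k - t) (by omega) (by omega)
                · intro r hr
                  have := hmatch (t + r) (by omega)
                  have e1 : i + (t + r) = i + t + r := by omega
                  have e2 : j + (t + r) = j + t + r := by omega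
                  rw [e1, e2] at this
                  exact this.symm
                · have e1 : j + t + (k - t) = j + k := by omega
                  have e2 : i + t + (k - t) = i + k := by omega
                  rw [e1, e2]
                  exact hba
              have hle : l.drop (i + t) ≤ pvFoldA l := not_lt.mp (foldA_max l (i + t) (by omega))
              exact lt_of_lt_of_le hstep hle
          · omega
        · rw [if_neg hba]
          have hab' : l.getD (i + k) default < l.getD (j + k) default :=
            lt_of_le_of_ne (not_lt.mp hba) hab
          have hm1 : i + k + 1 ≤ max (i + k + 1) j := le_max_left _ _
          have hm2 : j ≤ max (i + k + 1) j := le_max_right _ _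
          have hm3 : max (i + k + 1) j ≤ j + k := max_le (by omega) (by omega)
          apply ih _ _ 0 (by omega) (by omega) (fun t ht => absurd ht (by omega))
          · intro q hq hqi
            by_cases hqj : q < j ∧ q ≠ i
            · exact hdom q hqj.1 hqj.2
            · have hq' : i ≤ q ∧ q ≤ i + k := by
                rcases max_cases (i + k + 1) j with ⟨hmax, hle⟩ | ⟨hmax, hle⟩ <;> rw [hmax] at hq hqi <;> omega
              have hstep : l.drop q < l.drop (q + (j - i)) := by
                apply drop_lt_drop_of_diff l q (q + (j - i)) (i + k - q) (by omega) (by omega)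
                · intro r hr
                  have := hmatch (q + r - i) (by omega)
                  have e1 : i + (q + r - i) = q + r := by omega
                  have e2 : j + (q + r - i) = q + (j - i) + r := by omega
                  rw [e1, e2] at this
                  exact this
                · have e1 : q + (i + k - q) = i + k := by omega
                  have e2 : q + (j - i) + (i + k - q) = j + k := by omega
                  rw [e1, e2]
                  exact hab'
              have hle : l.drop (q + (j - i)) ≤ pvFoldA l :=
                not_lt.mp (foldA_max l (q + (j - i)) (by omega))
              exact lt_of_lt_of_le hstep hle
          · omega
    · rw [if_neg h]
      exact duval_exit l i j k hij (by omega) hmatch hdom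

lemma main_list (l : List Char) : String.ofList (pvFoldA l) = String.ofList (l.drop (duvalLoop l l.length (3 * l.length + 3) 0 1 0)) := by
  rcases Nat.eq_zero_or_pos l.length with hn | hn
  · rw [List.length_eq_zero_iff.mp hn]
    rfl
  · congr 1
    exact (duval_correct l (3 * l.length + 3) 0 1 0 (by omega) (by omega)
      (fun t ht => absurd ht (by omega))
      (fun q hq hqi => absurd (by omega : q = 0) hqi) (by omega)).symm

-- ===== VERDICT (by name: the statement is the Claim_ definition above) =====
theorem lastSubstring1_spec : Claim_equal_lastSubstring1 := by
  intro s _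
  unfold Spec_lastSubstring1
  rw [lastSubstring1_eq_foldA, lastSubstring1_alt]
  exact main_list s.toList
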